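-- pv_equiv track=rewrite | github.com/miliar/Code_Jam_Webscraper | solutions_python/Problem_187/660.py | GetEvacuationList
-- ===== SOURCE A (Python) =====
-- def findMaxIndex(senators):
--     max = senators[0]
--     index = 0
--
--     for i in range(0, len(senators)):
--         if senators[i] > max:
--             max = senators[i]
--             index = i
--
--     return index
--
-- def GetSenatorsRemaining(senators):
--     count = 0
--
--     for i in range(0, len(senators)):
--         if senators[i] > 0:
--             count += 1
--
--     return count
--
-- def GetEvacuationList(senators):
--     output = ""
--
--     while 1:
--         numSenators = GetSenatorsRemaining(senators)
--
--         if numSenators > 2: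
--             index = findMaxIndex(senators)
--             senators[index] -= 1
--             output += chr(65 + index) + " "
--
--         elif numSenators > 0:
--             index1 = findMaxIndex(senators)
--             senators[index1] -= 1
--             index2 = findMaxIndex(senators)
--             senators[index2] -= 1
--             output += chr(65 + index1) + chr(65 + index2) + " "
--         else:
--             break
--
--     return output
-- ===== SOURCE B (Python) =====
-- def GetEvacuationList(senators):
--     # Bucket enumeration: the greedy "decrement the first maximum" order equals
--     # listing, for each level from the top count down to 1, the parties whose
--     # count reaches that level, in index order.  (Does not mutate `senators`.)
--     top = 0
--     npos = 0
--     for c in senators: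
--         if c > 0:
--             npos += 1
--             if c > top:
--                 top = c
--     order = []
--     level = top
--     while level > 0:
--         for i, c in enumerate(senators):
--             if c >= level:
--                 order.append(chr(65 + i))
--         level -= 1
--     groups = []
--     if npos > 2:
--         k = len(order) - 2
--         for ch in order[:k]:
--             groups.append(ch + " ")
--         groups.append(order[k] + order[k + 1] + " ")
--     else:
--         i = 0
--         while i + 1 < len(order):
--             groups.append(order[i] + order[i + 1] + " ")
--             i += 2
--         if i < len(order):
--             groups.append(order[i] + " ")
--     return "".join(groups)
-- ===== Notes on version B (the rewrite author's own statement) =====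
-- stated objective: faster
-- what changed: B abandons A's step-by-step greedy simulation (three full rescans of the party list per emitted letter): it derives the whole evacuation order in one counting/bucket pass (for each level from the top count down to 1, list the parties whose count reaches that level, in index order) and then applies the single/pair grouping arithmetically to that precomputed sequence.
-- intended difference: On inputs with at most 2 parties having senators and an odd total of senators, A's final pair step pops a senator from an already-empty party and emits a phantom extra letter (e.g. [1] -> 'AA '), while B evacuates the genuinely last senator alone ('A '), which is the intended behaviour since only existing senators should appear. — e.g. on GetEvacuationList([1]): A returns "AA ", B returns "A "
import Mathlib
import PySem

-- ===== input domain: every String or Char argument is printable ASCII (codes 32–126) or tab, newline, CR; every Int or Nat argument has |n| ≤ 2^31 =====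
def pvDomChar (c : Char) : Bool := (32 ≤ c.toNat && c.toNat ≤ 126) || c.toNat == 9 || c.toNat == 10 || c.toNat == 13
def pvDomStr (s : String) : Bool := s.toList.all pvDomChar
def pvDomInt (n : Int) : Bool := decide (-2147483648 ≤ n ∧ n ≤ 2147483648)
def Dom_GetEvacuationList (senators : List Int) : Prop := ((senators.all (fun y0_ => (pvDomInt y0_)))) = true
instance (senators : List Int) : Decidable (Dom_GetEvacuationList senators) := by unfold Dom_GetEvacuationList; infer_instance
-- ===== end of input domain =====

-- B replaces A's step-by-step greedy simulation (rescan for the argmax, decrement, repeat)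
-- by a counting/bucket enumeration: for each level from the top count down to 1, list the
-- parties whose count reaches that level, in index order; the single/pair grouping is then
-- applied arithmetically to that precomputed sequence.  Equivalence is about the RETURN
-- value only (A zeroes out its list argument in place, B leaves it untouched); on inputs
-- with ≤ 2 nonempty parties and an odd senator total, A emits a phantom extra letter (D_ below).

-- chr(65 + i) + …  (output letter for a Nat index, used by port A)
def pvLetter (i : Nat) : String := String.ofList [Char.ofNat (65 + i)]
-- senators[i] -= 1  (port A's decrement; List.set is a no-op out of range, but A only
-- ever uses in-range indices produced by its findMaxIndex scans)
def pvDec (s : List Int) (i : Nat) : List Int := s.set i (s.getD i 0 - 1)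
-- fuel bound for port A's while-loop (totality guard only: each iteration strictly
-- decreases the sum of the positive entries)
def pvPossum (s : List Int) : Nat := (s.map Int.toNat).sum

-- ===== PORT A =====
-- findMaxIndex; the [] branch is unreachable in GetEvacuationList (only called when
-- some senator count is positive); Python would raise IndexError on [] there
def pvFindMaxIndexA (senators : List Int) : Nat :=
  match senators with
  | [] => 0
  | h :: _ =>
    ((List.range senators.length).foldl
      (fun (st : Int × Nat) i =>
        if senators.getD i 0 > st.1 then (senators.getD i 0, i) else st)
      (h, 0)).2

def pvGetSenatorsRemainingA (senators : List Int) : Nat :=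
  (List.range senators.length).foldl
    (fun count i => if senators.getD i 0 > 0 then count + 1 else count) 0

def pvLoopA (fuel : Nat) (s : List Int) (out : String) : String :=
  match fuel with
  | 0 => out
  | f + 1 =>
    let numSenators := pvGetSenatorsRemainingA s
    if numSenators > 2 then
      let index := pvFindMaxIndexA s
      pvLoopA f (pvDec s index) (out ++ pvLetter index ++ " ")
    else if numSenators > 0 then
      let i1 := pvFindMaxIndexA s
      let s1 := pvDec s i1
      let i2 := pvFindMaxIndexA s1
      pvLoopA f (pvDec s1 i2) (out ++ pvLetter i1 ++ pvLetter i2 ++ " ")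
    else out

def GetEvacuationList (senators : List Int) : String :=
  pvLoopA (pvPossum senators + 1) senators ""

-- ===== PORT B =====
-- chr(65 + i) for Source B's enumerate index (an Int in PySem; always ≥ 0 here)
def pvLetterI (i : Int) : String := String.ofList [Char.ofNat (65 + i).toNat]

-- Source B's first loop: top = max positive count, npos = number of positive parties
def pvTopNposB (senators : List Int) : Int × Nat :=
  senators.foldl
    (fun (st : Int × Nat) c =>
      if c > 0 then (if c > st.1 then c else st.1, st.2 + 1) else st) (0, 0)

-- 'for i, c in enumerate(senators): if c >= level: order.append(chr(65 + i))'
def pvLevelPassB (senators : List Int) (level : Int) : List String :=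
  (PySem.List.enumerate senators).foldl
    (fun acc ic => if level ≤ ic.2 then acc ++ [pvLetterI ic.1] else acc) []

-- 'while level > 0: … ; level -= 1', counting down from top; top ≥ 0 always, and the
-- loop runs exactly top iterations, so it is structural recursion on top.toNat
def pvOrderB (senators : List Int) : Nat → List String
  | 0 => []
  | n + 1 => pvLevelPassB senators ((n : Int) + 1) ++ pvOrderB senators n

-- 'while i + 1 < len(order): … i += 2' plus the trailing 'if i < len(order)'
def pvChunkPairsB : List String → List String
  | a :: b :: t => (a ++ b ++ " ") :: pvChunkPairsB t
  | [a] => [a ++ " "]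
  | [] => []

def GetEvacuationList_alt (senators : List Int) : String :=
  let tn := pvTopNposB senators
  let order := pvOrderB senators tn.1.toNat
  let groups :=
    if tn.2 > 2 then
      -- order[k] and order[k+1] are in range: npos > 2 forces len(order) ≥ 3
      (order.take (order.length - 2)).map (fun ch => ch ++ " ")
        ++ [order.getD (order.length - 2) "" ++ order.getD (order.length - 1) "" ++ " "]
    else
      pvChunkPairsB order
  String.join groups

-- ===== PRECONDITION & SPEC =====
-- On inputs with at most 2 parties having senators and an odd total of senators, A's final
-- pair step pops a senator from an already-empty party and emits a phantom extra letter
-- (e.g. [1] -> "AA "), while B evacuates the genuinely last senator alone ("A "), which is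
-- the intended behaviour since only existing senators should appear.
def D_GetEvacuationList (senators : List Int) : Prop :=
  senators.countP (fun v => decide (v > 0)) ≤ 2 ∧ ¬ (2 ∣ (senators.map Int.toNat).sum)
instance (senators : List Int) : Decidable (D_GetEvacuationList senators) := by
  unfold D_GetEvacuationList; infer_instance

def Spec_GetEvacuationList (senators : List Int) (out : String) : Prop :=
  ¬ D_GetEvacuationList senators → out = GetEvacuationList_alt senators
instance (senators : List Int) (out : String) : Decidable (Spec_GetEvacuationList senators out) := by
  unfold Spec_GetEvacuationList; infer_instance

def pvDiffWitness_GetEvacuationList : List Int := [1]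
def pvDiffWitnessOut_GetEvacuationList : String × String := ("AA ", "A ")

-- ===== CLAIM (what is proved, stated in full; the proofs are below) =====
def Claim_unchanged_GetEvacuationList : Prop := ∀ (senators : List Int), Dom_GetEvacuationList senators → Spec_GetEvacuationList senators (GetEvacuationList senators)
def Claim_changed_GetEvacuationList : Prop := Dom_GetEvacuationList (pvDiffWitness_GetEvacuationList) ∧ D_GetEvacuationList (pvDiffWitness_GetEvacuationList) ∧ GetEvacuationList (pvDiffWitness_GetEvacuationList) = pvDiffWitnessOut_GetEvacuationList.1 ∧ GetEvacuationList_alt (pvDiffWitness_GetEvacuationList) = pvDiffWitnessOut_GetEvacuationList.2 ∧ pvDiffWitnessOut_GetEvacuationList.1 ≠ pvDiffWitnessOut_GetEvacuationList.2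
def Claim_exact_GetEvacuationList : Prop := ∀ (senators : List Int), Dom_GetEvacuationList senators → D_GetEvacuationList senators → GetEvacuationList senators ≠ GetEvacuationList_alt senators

-- ===== LEMMAS AND PROOFS =====

-- proof-side view of A's findMaxIndex: first index of the maximum
def pvArgmaxB (s : List Int) : Nat :=
  (List.range' 1 (s.length - 1)).foldl
    (fun best i => if s.getD i 0 > s.getD best 0 then i else best) 0

-- string/join helpers
theorem pv_join_foldl (l : List String) : ∀ a : String, List.foldl (fun r s => r ++ s) a l = a ++ List.foldl (fun r s => r ++ s) "" l := by
  induction l with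
  | nil => simp
  | cons x xs ih =>
    intro a
    show List.foldl (fun r s => r ++ s) (a ++ x) xs = a ++ List.foldl (fun r s => r ++ s) ("" ++ x) xs
    rw [ih (a ++ x), ih ("" ++ x)]
    simp [String.append_assoc]

theorem pv_join_cons (a : String) (l : List String) : String.join (a :: l) = a ++ String.join l := by
  show List.foldl (fun r s => r ++ s) ("" ++ a) l = a ++ String.join l
  rw [pv_join_foldl l ("" ++ a)]; simp [String.join]

-- the range/getD fold of A's count is the plain countP
theorem pv_map_range_getD (s : List Int) : (List.range s.length).map (fun i => s.getD i 0) = s := by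
  apply List.ext_getElem
  · simp
  · intro i h1 h2
    simp [List.getElem?_eq_getElem h2]

theorem pv_foldl_count (s : List Int) : ∀ k : Nat,
    s.foldl (fun c v => if v > 0 then c + 1 else c) k = k + s.countP (fun v => decide (v > 0)) := by
  induction s with
  | nil => intro k; simp
  | cons a t ih =>
    intro k
    simp only [List.foldl, List.countP_cons]
    by_cases h : a > 0
    · simp [h, ih]; omega
    · simp [h, ih]

theorem pv_countA_eq (s : List Int) : pvGetSenatorsRemainingA s = s.countP (fun v => decide (v > 0)) := by
  unfold pvGetSenatorsRemainingA
  have h1 : ((List.range s.length).map (fun i => s.getD i 0)).foldl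
      (fun (c : Nat) (v : Int) => if v > 0 then c + 1 else c) 0
      = (List.range s.length).foldl (fun (c : Nat) i => if s.getD i 0 > 0 then c + 1 else c) 0 :=
    List.foldl_map
  rw [pv_map_range_getD] at h1
  rw [← h1, pv_foldl_count]; omega

-- A's findMaxIndex = first-max scan pvArgmaxB
theorem pv_fold_bridge (s : List Int) (L : List Nat) : ∀ b : Nat,
    (L.foldl (fun (st : Int × Nat) i => if s.getD i 0 > st.1 then (s.getD i 0, i) else st) (s.getD b 0, b))
      = (s.getD (L.foldl (fun best i => if s.getD i 0 > s.getD best 0 then i else best) b) 0,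
         L.foldl (fun best i => if s.getD i 0 > s.getD best 0 then i else best) b) := by
  induction L with
  | nil => intro b; rfl
  | cons x xs ih =>
    intro b
    simp only [List.foldl]
    by_cases h : s.getD x 0 > s.getD b 0
    · simp only [if_pos h]; exact ih x
    · simp only [if_neg h]; exact ih b

theorem pv_findMax_eq (s : List Int) (hne : s ≠ []) : pvFindMaxIndexA s = pvArgmaxB s := by
  cases s with
  | nil => exact absurd rfl hne
  | cons h t =>
    show ((List.range (h :: t).length).foldl
        (fun (st : Int × Nat) i => if (h :: t).getD i 0 > st.1 then ((h :: t).getD i 0, i) else st)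
        (h, 0)).2 = pvArgmaxB (h :: t)
    have hr : List.range (h :: t).length = 0 :: List.range' 1 t.length := by
      rw [show (h :: t).length = t.length + 1 from rfl, List.range_eq_range', List.range'_succ]
    rw [hr]
    simp only [List.foldl]
    have h0 : (h :: t).getD 0 0 = h := rfl
    rw [h0, if_neg (lt_irrefl h)]
    have hb : (h : Int) = (h :: t).getD 0 0 := rfl
    rw [show ((h : Int), 0) = ((h :: t).getD 0 0, 0) from by rw [← hb]]
    rw [pv_fold_bridge (h :: t) (List.range' 1 t.length) 0]
    rfl

-- bound, maximality and firstness of the argmax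
theorem pv_argmax_fold_lt (s : List Int) (L : List Nat) : ∀ b : Nat, b < s.length → (∀ i ∈ L, i < s.length) →
    L.foldl (fun best i => if s.getD i 0 > s.getD best 0 then i else best) b < s.length := by
  induction L with
  | nil => intro b hb _; exact hb
  | cons x xs ih =>
    intro b hb hL
    simp only [List.foldl]
    by_cases h : s.getD x 0 > s.getD b 0
    · simp only [h, if_pos]
      exact ih x (hL x (by simp)) (fun i hi => hL i (by simp [hi]))
    · simp only [if_neg h]
      exact ih b hb (fun i hi => hL i (by simp [hi]))

theorem pv_argmax_lt (s : List Int) (hne : s ≠ []) : pvArgmaxB s < s.length := by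
  unfold pvArgmaxB
  apply pv_argmax_fold_lt
  · cases s with
    | nil => exact absurd rfl hne
    | cons h t => simp
  · intro i hi
    have := List.mem_range'_1.mp hi
    omega

theorem pv_argmax_fold_max (s : List Int) (L : List Nat) : ∀ b : Nat,
    s.getD b 0 ≤ s.getD (L.foldl (fun best i => if s.getD i 0 > s.getD best 0 then i else best) b) 0 ∧
    (∀ j ∈ L, s.getD j 0 ≤ s.getD (L.foldl (fun best i => if s.getD i 0 > s.getD best 0 then i else best) b) 0) := by
  induction L with
  | nil => intro b; exact ⟨le_refl _, by simp⟩
  | cons x xs ih =>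
    intro b
    simp only [List.foldl]
    by_cases h : s.getD x 0 > s.getD b 0
    · simp only [h, if_pos]
      refine ⟨le_of_lt (lt_of_lt_of_le h (ih x).1), ?_⟩
      intro j hj
      rcases List.mem_cons.mp hj with rfl | hj
      · exact (ih j).1
      · exact (ih x).2 j hj
    · simp only [if_neg h]
      refine ⟨(ih b).1, ?_⟩
      intro j hj
      rcases List.mem_cons.mp hj with rfl | hj
      · exact le_trans (not_lt.mp h) (ih b).1
      · exact (ih b).2 j hj

theorem pv_argmax_max (s : List Int) (j : Nat) (hj : j < s.length) :
    s.getD j 0 ≤ s.getD (pvArgmaxB s) 0 := by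
  unfold pvArgmaxB
  rcases Nat.eq_zero_or_pos j with rfl | hj1
  · exact (pv_argmax_fold_max s (List.range' 1 (s.length - 1)) 0).1
  · refine (pv_argmax_fold_max s (List.range' 1 (s.length - 1)) 0).2 j ?_
    refine List.mem_range'_1.mpr ⟨hj1, ?_⟩
    omega

theorem pv_argmax_pos (s : List Int) (h : 0 < s.countP (fun v => decide (v > 0))) :
    0 < s.getD (pvArgmaxB s) 0 := by
  obtain ⟨a, ha, hp⟩ := List.countP_pos_iff.mp h
  obtain ⟨i, hi, rfl⟩ := List.mem_iff_getElem.mp ha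
  have : s.getD i 0 = s[i] := List.getD_eq_getElem s 0 hi
  have hle := pv_argmax_max s i hi
  rw [this] at hle
  simp only [decide_eq_true_eq] at hp
  omega

-- firstness: the scan keeps the FIRST maximum (strictly bigger than everything before it)
theorem pv_argmax_fold_first (s : List Int) : ∀ (n a b : Nat), b < a →
    (∀ j < b, s.getD j 0 < s.getD b 0) → (∀ j < a, s.getD j 0 ≤ s.getD b 0) →
    (∀ j < (List.range' a n).foldl (fun best i => if s.getD i 0 > s.getD best 0 then i else best) b,
       s.getD j 0 < s.getD ((List.range' a n).foldl (fun best i => if s.getD i 0 > s.getD best 0 then i else best) b) 0) ∧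
    (∀ j < a + n, s.getD j 0 ≤ s.getD ((List.range' a n).foldl (fun best i => if s.getD i 0 > s.getD best 0 then i else best) b) 0) := by
  intro n
  induction n with
  | zero =>
    intro a b hba h1 h2
    simp only [List.range'_zero, List.foldl_nil]
    exact ⟨h1, by simpa using h2⟩
  | succ n ih =>
    intro a b hba h1 h2
    rw [List.range'_succ]
    simp only [List.foldl_cons]
    by_cases h : s.getD a 0 > s.getD b 0
    · rw [if_pos h]
      have h1' : ∀ j < a, s.getD j 0 < s.getD a 0 := fun j hj => lt_of_le_of_lt (h2 j hj) h
      have h2' : ∀ j < a + 1, s.getD j 0 ≤ s.getD a 0 := by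
        intro j hj
        rcases Nat.lt_succ_iff_lt_or_eq.mp hj with hj | rfl
        · exact le_of_lt (h1' j hj)
        · exact le_refl _
      obtain ⟨c1, c3⟩ := ih (a + 1) a (Nat.lt_succ_self a) h1' h2'
      exact ⟨c1, fun j hj => c3 j (by omega)⟩
    · rw [if_neg h]
      have h2' : ∀ j < a + 1, s.getD j 0 ≤ s.getD b 0 := by
        intro j hj
        rcases Nat.lt_succ_iff_lt_or_eq.mp hj with hj | rfl
        · exact h2 j hj
        · exact not_lt.mp h
      obtain ⟨c1, c3⟩ := ih (a + 1) b (by omega) h1 h2'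
      exact ⟨c1, fun j hj => c3 j (by omega)⟩

theorem pv_argmax_first (s : List Int) (j : Nat) (hj : j < pvArgmaxB s) :
    s.getD j 0 < s.getD (pvArgmaxB s) 0 := by
  have := (pv_argmax_fold_first s (s.length - 1) 1 0 Nat.zero_lt_one
    (by intro j hj; omega) (by intro j hj; interval_cases j; exact le_refl _)).1
  exact this j hj

-- decrement facts
theorem pv_getD_dec_self (s : List Int) (i : Nat) (h : i < s.length) :
    (pvDec s i).getD i 0 = s.getD i 0 - 1 := by
  simp [pvDec, List.getD, h]

theorem pv_countP_dec (s : List Int) : ∀ i : Nat, i < s.length →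
    ((pvDec s i).getD i 0 = 0 → 0 < s.countP (fun v => decide (v > 0))) ∧
    (pvDec s i).countP (fun v => decide (v > 0)) =
      if (pvDec s i).getD i 0 = 0 then s.countP (fun v => decide (v > 0)) - 1
      else s.countP (fun v => decide (v > 0)) := by
  induction s with
  | nil => intro i h; simp at h
  | cons a t ih =>
    intro i h
    cases i with
    | zero =>
      show (((a - 1) :: t).getD 0 0 = 0 → 0 < _) ∧
        ((a - 1) :: t).countP _ = if ((a - 1) :: t).getD 0 0 = 0 then _ else _
      simp only [List.countP_cons, List.getD_cons_zero, decide_eq_true_eq]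
      constructor
      · intro h0; split_ifs <;> omega
      · split_ifs <;> omega
    | succ j =>
      have hj : j < t.length := by simp only [List.length_cons] at h; omega
      obtain ⟨ih1, ih2⟩ := ih j hj
      show ((a :: pvDec t j).getD (j + 1) 0 = 0 → 0 < _) ∧
        (a :: pvDec t j).countP _ = if (a :: pvDec t j).getD (j + 1) 0 = 0 then _ else _
      simp only [List.countP_cons, List.getD_cons_succ] at ih1 ih2 ⊢
      constructor
      · intro h0
        have := ih1 h0
        split_ifs <;> omega
      · rcases eq_or_ne ((pvDec t j).getD j 0) 0 with hc | hc
        · have hpos := ih1 hc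
          rw [if_pos hc] at ih2 ⊢
          split_ifs <;> omega
        · rw [if_neg hc] at ih2 ⊢
          split_ifs <;> omega

theorem pv_countP_dec_le (s : List Int) : ∀ i : Nat,
    (pvDec s i).countP (fun v => decide (v > 0)) ≤ s.countP (fun v => decide (v > 0)) := by
  induction s with
  | nil => intro i; simp [pvDec]
  | cons a t ih =>
    intro i
    cases i with
    | zero =>
      show ((a - 1) :: t).countP _ ≤ _
      simp only [List.countP_cons, decide_eq_true_eq]
      split_ifs <;> omega
    | succ j =>
      have := ih j
      show (a :: pvDec t j).countP _ ≤ _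
      simp only [List.countP_cons]
      split_ifs <;> omega

theorem pv_possum_dec_eq (s : List Int) : ∀ i : Nat, i < s.length → 0 < s.getD i 0 →
    pvPossum (pvDec s i) + 1 = pvPossum s := by
  induction s with
  | nil => intro i h; simp at h
  | cons a t ih =>
    intro i hi hpos
    cases i with
    | zero =>
      show pvPossum ((a - 1) :: t) + 1 = pvPossum (a :: t)
      simp only [List.getD_cons_zero] at hpos
      simp only [pvPossum, List.map_cons, List.sum_cons]
      omega
    | succ j =>
      have hj : j < t.length := by simp only [List.length_cons] at hi; omega
      simp only [List.getD_cons_succ] at hpos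
      have := ih j hj hpos
      show pvPossum (a :: pvDec t j) + 1 = pvPossum (a :: t)
      simp only [pvPossum, List.map_cons, List.sum_cons] at this ⊢
      omega

theorem pv_possum_zero (s : List Int) (h : s.countP (fun v => decide (v > 0)) = 0) :
    pvPossum s = 0 := by
  induction s with
  | nil => rfl
  | cons a t ih =>
    simp only [List.countP_cons] at h
    simp only [pvPossum, List.map_cons, List.sum_cons]
    by_cases ha : a > 0
    · simp [ha] at h
    · have : t.countP (fun v => decide (v > 0)) = 0 := by
        split_ifs at h <;> omega
      have := ih this
      simp only [pvPossum] at this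
      omega

theorem pv_npos_pos (s : List Int) (h : 0 < pvPossum s) :
    0 < s.countP (fun v => decide (v > 0)) := by
  by_contra hc
  have := pv_possum_zero s (by omega)
  omega

theorem pv_npos_le_possum (s : List Int) :
    s.countP (fun v => decide (v > 0)) ≤ pvPossum s := by
  induction s with
  | nil => simp [pvPossum]
  | cons a t ih =>
    simp only [List.countP_cons, pvPossum, List.map_cons, List.sum_cons] at ih ⊢
    split_ifs with h <;> simp only [decide_eq_true_eq] at * <;> omega

theorem pv_possum_eq_npos (s : List Int) (h : ∀ x ∈ s, x ≤ 1) :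
    pvPossum s = s.countP (fun v => decide (v > 0)) := by
  induction s with
  | nil => rfl
  | cons a t ih =>
    have ha := h a (by simp)
    have := ih (fun x hx => h x (by simp [hx]))
    simp only [pvPossum, List.map_cons, List.sum_cons, List.countP_cons] at this ⊢
    split_ifs with hp <;> simp only [decide_eq_true_eq] at * <;> omega

theorem pv_countP_pos_ne_nil (s : List Int) (h : 0 < s.countP (fun v => decide (v > 0))) : s ≠ [] := by
  intro hn; subst hn; simp at h

-- the maximum tracked by Source B's first loop
def pvT (s : List Int) : Int := s.foldl (fun t c => max t c) 0

theorem pv_T_fold (s : List Int) : ∀ t : Int,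
    t ≤ s.foldl (fun t c => max t c) t ∧ ∀ x ∈ s, x ≤ s.foldl (fun t c => max t c) t := by
  induction s with
  | nil => intro t; exact ⟨le_refl _, by simp⟩
  | cons a l ih =>
    intro t
    simp only [List.foldl_cons]
    obtain ⟨h1, h2⟩ := ih (max t a)
    refine ⟨le_trans (le_max_left t a) h1, ?_⟩
    intro x hx
    rcases List.mem_cons.mp hx with rfl | hx
    · exact le_trans (le_max_right t x) h1
    · exact h2 x hx

theorem pv_T_nonneg (s : List Int) : 0 ≤ pvT s := (pv_T_fold s 0).1
theorem pv_T_ge (s : List Int) (x : Int) (hx : x ∈ s) : x ≤ pvT s := (pv_T_fold s 0).2 x hx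

theorem pv_T_le_aux : ∀ (s : List Int) (t M : Int), t ≤ M → (∀ x ∈ s, x ≤ M) →
    s.foldl (fun t c => max t c) t ≤ M := by
  intro s
  induction s with
  | nil => intro t M ht _; simpa using ht
  | cons a l ih =>
    intro t M ht h
    simp only [List.foldl_cons]
    refine ih (max t a) M ?_ (fun x hx => h x (by simp [hx]))
    have := h a (by simp)
    omega

theorem pv_T_le (s : List Int) (M : Int) (hM : 0 ≤ M) (h : ∀ x ∈ s, x ≤ M) : pvT s ≤ M :=
  pv_T_le_aux s 0 M hM h

theorem pv_topnpos_fold (s : List Int) : ∀ (t : Int) (n : Nat), 0 ≤ t →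
    s.foldl (fun (st : Int × Nat) c =>
      if c > 0 then (if c > st.1 then c else st.1, st.2 + 1) else st) (t, n)
    = (s.foldl (fun t c => max t c) t, n + s.countP (fun v => decide (v > 0))) := by
  induction s with
  | nil => intro t n _; simp
  | cons a l ih =>
    intro t n ht
    simp only [List.foldl_cons, List.countP_cons]
    by_cases ha : a > 0
    · rw [if_pos ha]
      have : (if a > t then a else t) = max t a := by omega
      rw [this, ih (max t a) (n + 1) (by omega)]
      simp [ha]
      omega
    · rw [if_neg ha]
      have : max t a = t := by omega
      rw [ih t n ht, ← this]
      simp [ha]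

theorem pv_topnpos_eq (s : List Int) :
    pvTopNposB s = (pvT s, s.countP (fun v => decide (v > 0))) := by
  unfold pvTopNposB pvT
  rw [pv_topnpos_fold s 0 0 (le_refl 0)]
  simp

theorem pv_getD_mem (s : List Int) (i : Nat) (h : i < s.length) : s.getD i 0 ∈ s := by
  rw [List.getD_eq_getElem s 0 h]; exact List.getElem_mem h

theorem pv_T_attained (s : List Int) (h : 0 < s.countP (fun v => decide (v > 0))) :
    pvT s = s.getD (pvArgmaxB s) 0 := by
  have hne := pv_countP_pos_ne_nil s h
  have hlt := pv_argmax_lt s hne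
  have hpos := pv_argmax_pos s h
  refine le_antisymm ?_ (pv_T_ge s _ (pv_getD_mem s _ hlt))
  refine pv_T_le s _ (by omega) ?_
  intro x hx
  obtain ⟨j, hj, rfl⟩ := List.mem_iff_getElem.mp hx
  rw [← List.getD_eq_getElem s 0 hj]
  exact pv_argmax_max s j hj

theorem pv_T_npos0 (s : List Int) (h : s.countP (fun v => decide (v > 0)) = 0) : pvT s = 0 := by
  refine le_antisymm ?_ (pv_T_nonneg s)
  refine pv_T_le s 0 (le_refl 0) ?_
  intro x hx
  by_contra hc
  have : 0 < s.countP (fun v => decide (v > 0)) :=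
    List.countP_pos_iff.mpr ⟨x, hx, by simp; omega⟩
  omega

-- proof-side view of one level pass: indices (offset k) whose value reaches level l
def pvPass (l : Int) : List Int → Nat → List Nat
  | [], _ => []
  | c :: t, k => if l ≤ c then k :: pvPass l t (k + 1) else pvPass l t (k + 1)

theorem pv_letterI_nat (k : Nat) : pvLetterI (k : Int) = pvLetter k := by
  unfold pvLetterI pvLetter
  have : ((65 : Int) + (k : Int)).toNat = 65 + k := by omega
  rw [this]

theorem pv_levelpass_fold (l : Int) (s : List Int) : ∀ (k : Nat) (acc : List String),
    (PySem.List.enumerate s (k : Int)).foldl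
      (fun acc ic => if l ≤ ic.2 then acc ++ [pvLetterI ic.1] else acc) acc
    = acc ++ (pvPass l s k).map pvLetter := by
  induction s with
  | nil => intro k acc; simp [PySem.List.enumerate_nil, pvPass]
  | cons c t ih =>
    intro k acc
    rw [PySem.List.enumerate_cons]
    simp only [List.foldl_cons, pvPass]
    by_cases h : l ≤ c
    · rw [if_pos h, if_pos h]
      have : ((k : Int) + 1) = ((k + 1 : Nat) : Int) := by push_cast; ring
      rw [this, ih (k + 1)]
      simp [pv_letterI_nat]
    · rw [if_neg h, if_neg h]
      have : ((k : Int) + 1) = ((k + 1 : Nat) : Int) := by push_cast; ring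
      rw [this, ih (k + 1)]

theorem pv_levelpass_eq (s : List Int) (l : Int) :
    pvLevelPassB s l = (pvPass l s 0).map pvLetter := by
  unfold pvLevelPassB
  have := pv_levelpass_fold l s 0 []
  simpa using this

theorem pv_pass_empty (l : Int) (s : List Int) (h : ∀ x ∈ s, x < l) : ∀ k, pvPass l s k = [] := by
  induction s with
  | nil => intro k; rfl
  | cons c t ih =>
    intro k
    have hc := h c (by simp)
    simp only [pvPass, if_neg (not_le.mpr hc)]
    exact ih (fun x hx => h x (by simp [hx])) (k + 1)

-- head/tail split at the top level m: the first index attaining m comes first, and after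
-- decrementing it the rest of the level is unchanged
theorem pv_pass_split (m : Int) (s : List Int) : ∀ (i0 : Nat), i0 < s.length →
    (∀ j < i0, s.getD j 0 < m) → s.getD i0 0 = m → ∀ k,
    pvPass m s k = (k + i0) :: pvPass m (pvDec s i0) k := by
  induction s with
  | nil => intro i0 h; simp at h
  | cons c t ih =>
    intro i0 hlen hfirst hval k
    cases i0 with
    | zero =>
      simp only [List.getD_cons_zero] at hval
      subst hval
      show pvPass c (c :: t) k = (k + 0) :: pvPass c ((c - 1) :: t) k
      simp only [pvPass, if_pos (le_refl c), if_neg (by omega : ¬ c ≤ c - 1)]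
      simp
    | succ j =>
      have hc : c < m := by
        have := hfirst 0 (Nat.succ_pos j)
        simpa using this
      have hj : j < t.length := by simp only [List.length_cons] at hlen; omega
      have hfirst' : ∀ j' < j, t.getD j' 0 < m := by
        intro j' hj'
        have := hfirst (j' + 1) (by omega)
        simpa using this
      have hval' : t.getD j 0 = m := by simpa using hval
      show pvPass m (c :: t) k = (k + (j + 1)) :: pvPass m (c :: pvDec t j) k
      simp only [pvPass, if_neg (not_le.mpr hc)]
      rw [ih j hj hfirst' hval' (k + 1)]
      congr 1
      omega

-- below the top level, decrementing the (exact-valued) top entry changes nothing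
theorem pv_pass_dec_eq (m l : Int) (s : List Int) (hl : l ≤ m - 1) : ∀ (i0 : Nat),
    s.getD i0 0 = m → ∀ k, pvPass l (pvDec s i0) k = pvPass l s k := by
  induction s with
  | nil => intro i0 _ k; rfl
  | cons c t ih =>
    intro i0 hval k
    cases i0 with
    | zero =>
      simp only [List.getD_cons_zero] at hval
      subst hval
      show pvPass l ((c - 1) :: t) k = pvPass l (c :: t) k
      simp only [pvPass]
      rw [if_pos (by omega : l ≤ c - 1), if_pos (by omega : l ≤ c)]
    | succ j =>
      have hval' : t.getD j 0 = m := by simpa using hval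
      show pvPass l (c :: pvDec t j) k = pvPass l (c :: t) k
      simp only [pvPass]
      rw [ih j hval' (k + 1)]

-- the greedy pick sequence, as a proof-side list of indices
def pvBkt (s : List Int) : List Nat :=
  if h : 0 < s.countP (fun v => decide (v > 0)) then
    pvArgmaxB s :: pvBkt (pvDec s (pvArgmaxB s))
  else []
termination_by pvPossum s
decreasing_by
  have hne := pv_countP_pos_ne_nil s h
  have := pv_possum_dec_eq s (pvArgmaxB s) (pv_argmax_lt s hne) (pv_argmax_pos s h)
  omega

theorem pv_bkt_length (s : List Int) : (pvBkt s).length = pvPossum s := by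
  rw [pvBkt]
  split_ifs with h
  · have hne := pv_countP_pos_ne_nil s h
    have hd := pv_possum_dec_eq s (pvArgmaxB s) (pv_argmax_lt s hne) (pv_argmax_pos s h)
    have := pv_bkt_length (pvDec s (pvArgmaxB s))
    simp only [List.length_cons, this]
    omega
  · have : pvPossum s = 0 := by
      by_contra hc
      exact h (pv_npos_pos s (by omega))
    simp [this]
termination_by pvPossum s
decreasing_by
  have hne := pv_countP_pos_ne_nil s h
  have := pv_possum_dec_eq s (pvArgmaxB s) (pv_argmax_lt s hne) (pv_argmax_pos s h)
  omega

-- levels above the maximum contribute nothing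
theorem pv_order_pad (s : List Int) : ∀ (U : Nat), (pvT s).toNat ≤ U →
    pvOrderB s U = pvOrderB s (pvT s).toNat := by
  intro U
  induction U with
  | zero =>
    intro h
    have h0 : (pvT s).toNat = 0 := by omega
    rw [h0]
  | succ n ih =>
    intro h
    rcases Nat.eq_or_lt_of_le h with heq | hlt
    · rw [heq]
    · have hT : pvT s < (n : Int) + 1 := by
        have h0 := pv_T_nonneg s
        omega
      have hpass : pvLevelPassB s ((n : Int) + 1) = [] := by
        rw [pv_levelpass_eq, pv_pass_empty ((n : Int) + 1) s ?_ 0]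
        · rfl
        · intro x hx
          exact lt_of_le_of_lt (pv_T_ge s x hx) hT
      show pvLevelPassB s ((n : Int) + 1) ++ pvOrderB s n = _
      rw [hpass, List.nil_append]
      exact ih (by omega)

-- levelwise: after decrementing the top entry, all levels below the old top agree
theorem pv_order_dec_eq (s : List Int) (i0 : Nat) (m : Int) (hval : s.getD i0 0 = m) :
    ∀ (n : Nat), (n : Int) ≤ m - 1 → pvOrderB (pvDec s i0) n = pvOrderB s n := by
  intro n
  induction n with
  | zero => intro _; rfl
  | succ n ih =>
    intro h
    show pvLevelPassB (pvDec s i0) ((n : Int) + 1) ++ _ = pvLevelPassB s ((n : Int) + 1) ++ _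
    rw [pv_levelpass_eq, pv_levelpass_eq,
      pv_pass_dec_eq m ((n : Int) + 1) s (by push_cast at h ⊢; omega) i0 hval 0,
      ih (by push_cast at h ⊢; omega)]

-- the bucket enumeration equals the greedy pick sequence
theorem pv_order_eq_bkt (s : List Int) :
    pvOrderB s (pvT s).toNat = (pvBkt s).map pvLetter := by
  rw [pvBkt]
  split_ifs with h
  · have hne := pv_countP_pos_ne_nil s h
    have hlt := pv_argmax_lt s hne
    have hpos := pv_argmax_pos s h
    have hT := pv_T_attained s h
    have hTnat : (pvT s).toNat = ((pvT s).toNat - 1) + 1 := by omega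
    have hcast : (((pvT s).toNat - 1 : Nat) : Int) + 1 = s.getD (pvArgmaxB s) 0 := by omega
    have hT' : pvT (pvDec s (pvArgmaxB s)) ≤ pvT s := by
      refine pv_T_le _ (pvT s) (pv_T_nonneg s) ?_
      intro x hx
      rcases List.mem_or_eq_of_mem_set hx with hx | rfl
      · exact pv_T_ge s x hx
      · omega
    rw [hTnat]
    simp only [pvOrderB]
    rw [hcast, pv_levelpass_eq,
      pv_pass_split (s.getD (pvArgmaxB s) 0) s (pvArgmaxB s) hlt
        (fun j hj => pv_argmax_first s j hj) rfl 0,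
      ← pv_order_dec_eq s (pvArgmaxB s) (s.getD (pvArgmaxB s) 0) rfl ((pvT s).toNat - 1)
        (by omega)]
    simp only [List.map_cons, Nat.zero_add, List.cons_append]
    rw [← pv_levelpass_eq]
    have hre : pvLevelPassB (pvDec s (pvArgmaxB s)) (s.getD (pvArgmaxB s) 0)
        ++ pvOrderB (pvDec s (pvArgmaxB s)) ((pvT s).toNat - 1)
        = pvOrderB (pvDec s (pvArgmaxB s)) (((pvT s).toNat - 1) + 1) := by
      simp only [pvOrderB]
      rw [hcast]
    rw [hre, ← hTnat, pv_order_pad (pvDec s (pvArgmaxB s)) (pvT s).toNat (by omega),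
      pv_order_eq_bkt (pvDec s (pvArgmaxB s))]
  · have hT : pvT s = 0 := pv_T_npos0 s (by omega)
    rw [hT]
    rfl
termination_by pvPossum s
decreasing_by
  have hne := pv_countP_pos_ne_nil s h
  have := pv_possum_dec_eq s (pvArgmaxB s) (pv_argmax_lt s hne) (pv_argmax_pos s h)
  omega

-- B's npos>2 grouping expression, recursively
def pvGS : List String → List String
  | a :: b :: c :: t => (a ++ " ") :: pvGS (b :: c :: t)
  | [a, b] => [a ++ b ++ " "]
  | _ => []

theorem pv_gs_eq_take : ∀ (L : List String), 2 ≤ L.length →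
    pvGS L = (L.take (L.length - 2)).map (fun ch => ch ++ " ")
      ++ [L.getD (L.length - 2) "" ++ L.getD (L.length - 1) "" ++ " "]
  | [], h => by simp at h
  | [a], h => by simp at h
  | [a, b], _ => by
    show [a ++ b ++ " "] = _
    simp
  | a :: b :: c :: t, _ => by
    have ih := pv_gs_eq_take (b :: c :: t) (by simp)
    have h1 : (a :: b :: c :: t).length - 2 = ((b :: c :: t).length - 2) + 1 := by
      simp [List.length_cons]
    have h2 : (a :: b :: c :: t).length - 1 = ((b :: c :: t).length - 1) + 1 := by
      simp [List.length_cons]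
    show (a ++ " ") :: pvGS (b :: c :: t) = _
    rw [ih, h1, h2]
    simp [List.take_succ_cons]
    rfl
termination_by L => L.length

-- accumulator lemmas for port A's loop
theorem pv_loopA_acc2 : ∀ (f : Nat) (s : List Int) (a b : String), pvLoopA f s (a ++ b) = a ++ pvLoopA f s b := by
  intro f
  induction f with
  | zero => intro s a b; simp [pvLoopA]
  | succ f ih =>
    intro s a b
    simp only [pvLoopA]
    split_ifs
    · rw [show ((a ++ b) ++ pvLetter (pvFindMaxIndexA s) ++ " ")
          = a ++ (b ++ pvLetter (pvFindMaxIndexA s) ++ " ") by simp [String.append_assoc]]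
      exact ih _ _ _
    · rw [show ((a ++ b) ++ pvLetter (pvFindMaxIndexA s)
            ++ pvLetter (pvFindMaxIndexA (pvDec s (pvFindMaxIndexA s))) ++ " ")
          = a ++ (b ++ pvLetter (pvFindMaxIndexA s)
            ++ pvLetter (pvFindMaxIndexA (pvDec s (pvFindMaxIndexA s))) ++ " ") by simp [String.append_assoc]]
      exact ih _ _ _
    · rfl

theorem pv_loopA_acc (f : Nat) (s : List Int) (a : String) : pvLoopA f s a = a ++ pvLoopA f s "" := by
  conv_lhs => rw [show a = a ++ "" by simp]
  exact pv_loopA_acc2 f s a ""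

-- pair phase: with ≤ 2 positive parties and an even positive total, A emits the greedy
-- sequence chunked in pairs
theorem pv_pair_phase : ∀ (f : Nat) (s : List Int), pvPossum s < f →
    s.countP (fun v => decide (v > 0)) ≤ 2 → 2 ∣ pvPossum s →
    pvLoopA f s "" = String.join (pvChunkPairsB ((pvBkt s).map pvLetter)) := by
  intro f
  induction f with
  | zero => intro s h _ _; omega
  | succ f ih =>
    intro s hf h2 heven
    by_cases hpos : 0 < s.countP (fun v => decide (v > 0))
    · have hne := pv_countP_pos_ne_nil s hpos
      have hi1lt := pv_argmax_lt s hne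
      have hi1pos := pv_argmax_pos s hpos
      have hps1 : pvPossum (pvDec s (pvArgmaxB s)) + 1 = pvPossum s :=
        pv_possum_dec_eq s _ hi1lt hi1pos
      have hple := pv_npos_le_possum s
      have hpos2 : 2 ≤ pvPossum s := by rcases heven with ⟨k, hk⟩; omega
      have hnpos1 : 0 < (pvDec s (pvArgmaxB s)).countP (fun v => decide (v > 0)) :=
        pv_npos_pos _ (by omega)
      have hs1ne : pvDec s (pvArgmaxB s) ≠ [] := pv_countP_pos_ne_nil _ hnpos1
      have hi2lt := pv_argmax_lt _ hs1ne
      have hi2pos := pv_argmax_pos _ hnpos1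
      have hps2 : pvPossum (pvDec (pvDec s (pvArgmaxB s)) (pvArgmaxB (pvDec s (pvArgmaxB s)))) + 1
          = pvPossum (pvDec s (pvArgmaxB s)) := pv_possum_dec_eq _ _ hi2lt hi2pos
      have hn1 := pv_countP_dec_le s (pvArgmaxB s)
      have hn2 := pv_countP_dec_le (pvDec s (pvArgmaxB s)) (pvArgmaxB (pvDec s (pvArgmaxB s)))
      simp only [pvLoopA]
      rw [pv_countA_eq s]
      rw [if_neg (by omega), if_pos (by omega)]
      rw [pv_findMax_eq s hne, pv_findMax_eq _ hs1ne]
      rw [pv_loopA_acc]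
      rw [pvBkt, dif_pos hpos, pvBkt, dif_pos hnpos1]
      simp only [List.map_cons]
      rw [show pvChunkPairsB (pvLetter (pvArgmaxB s) :: pvLetter (pvArgmaxB (pvDec s (pvArgmaxB s)))
            :: (pvBkt (pvDec (pvDec s (pvArgmaxB s)) (pvArgmaxB (pvDec s (pvArgmaxB s))))).map pvLetter)
          = (pvLetter (pvArgmaxB s) ++ pvLetter (pvArgmaxB (pvDec s (pvArgmaxB s))) ++ " ")
            :: pvChunkPairsB ((pvBkt (pvDec (pvDec s (pvArgmaxB s)) (pvArgmaxB (pvDec s (pvArgmaxB s))))).map pvLetter) from rfl]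
      rw [pv_join_cons]
      rw [ih _ (by omega) (by omega) (by omega)]
      simp [String.append_assoc]
    · simp only [pvLoopA]
      rw [pv_countA_eq s]
      rw [if_neg (by omega), if_neg (by omega)]
      rw [pvBkt, dif_neg hpos]
      simp [pvChunkPairsB, String.join]

-- singles phase: with ≥ 3 positive parties, A emits singles down to the last two picks
theorem pv_single_phase : ∀ (f : Nat) (s : List Int), pvPossum s < f →
    3 ≤ s.countP (fun v => decide (v > 0)) →
    pvLoopA f s "" = String.join (pvGS ((pvBkt s).map pvLetter)) := by
  intro f
  induction f with
  | zero => intro s h _; omega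
  | succ f ih =>
    intro s hf h3
    have hpos : 0 < s.countP (fun v => decide (v > 0)) := by omega
    have hne := pv_countP_pos_ne_nil s hpos
    have hi1lt := pv_argmax_lt s hne
    have hi1pos := pv_argmax_pos s hpos
    have hps1 : pvPossum (pvDec s (pvArgmaxB s)) + 1 = pvPossum s :=
      pv_possum_dec_eq s _ hi1lt hi1pos
    have hcnt := (pv_countP_dec s (pvArgmaxB s) hi1lt).2
    simp only [pvLoopA]
    rw [pv_countA_eq s, if_pos (by omega)]
    rw [pv_findMax_eq s hne]
    rw [pv_loopA_acc]
    rw [pvBkt, dif_pos hpos]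
    simp only [List.map_cons]
    by_cases hk : 3 ≤ (pvDec s (pvArgmaxB s)).countP (fun v => decide (v > 0))
    · have hlen : 2 ≤ ((pvBkt (pvDec s (pvArgmaxB s))).map pvLetter).length := by
        simp only [List.length_map, pv_bkt_length]
        have := pv_npos_le_possum (pvDec s (pvArgmaxB s))
        omega
      rcases hL : (pvBkt (pvDec s (pvArgmaxB s))).map pvLetter with _ | ⟨x, M⟩
      · rw [hL] at hlen; simp at hlen
      · rcases M with _ | ⟨y, M2⟩
        · rw [hL] at hlen; simp at hlen
        · rw [show pvGS (pvLetter (pvArgmaxB s) :: x :: y :: M2)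
              = (pvLetter (pvArgmaxB s) ++ " ") :: pvGS (x :: y :: M2) from rfl]
          rw [pv_join_cons, ← hL, ih _ (by omega) hk]
          simp [String.append_assoc]
    · have hdrop : (pvDec s (pvArgmaxB s)).getD (pvArgmaxB s) 0 = 0 := by
        by_contra hc
        rw [if_neg hc] at hcnt
        omega
      have hc3 : s.countP (fun v => decide (v > 0)) = 3 ∧
          (pvDec s (pvArgmaxB s)).countP (fun v => decide (v > 0)) = 2 := by
        rw [if_pos hdrop] at hcnt
        constructor <;> omega
      have hval1 : s.getD (pvArgmaxB s) 0 = 1 := by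
        have := pv_getD_dec_self s (pvArgmaxB s) hi1lt
        omega
      have hall : ∀ x ∈ s, x ≤ 1 := by
        intro x hx
        obtain ⟨j, hj, rfl⟩ := List.mem_iff_getElem.mp hx
        rw [← List.getD_eq_getElem s 0 hj]
        have := pv_argmax_max s j hj
        omega
      have hposs : pvPossum s = 3 := by
        rw [pv_possum_eq_npos s hall, hc3.1]
      have hposs1 : pvPossum (pvDec s (pvArgmaxB s)) = 2 := by omega
      rw [pv_pair_phase f _ (by omega) (by omega) (by omega)]
      have hlen2 : (pvBkt (pvDec s (pvArgmaxB s))).length = 2 := by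
        rw [pv_bkt_length]; exact hposs1
      rcases hLL : pvBkt (pvDec s (pvArgmaxB s)) with _ | ⟨y, M⟩
      · rw [hLL] at hlen2; simp at hlen2
      · rcases M with _ | ⟨z, M2⟩
        · rw [hLL] at hlen2; simp at hlen2
        · rcases M2 with _ | ⟨w, M3⟩
          · simp only [List.map_cons, List.map_nil]
            rw [show pvChunkPairsB [pvLetter y, pvLetter z]
                = [pvLetter y ++ pvLetter z ++ " "] from rfl]
            rw [show pvGS [pvLetter (pvArgmaxB s), pvLetter y, pvLetter z]
                = (pvLetter (pvArgmaxB s) ++ " ") :: pvGS [pvLetter y, pvLetter z] from rfl]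
            rw [show pvGS [pvLetter y, pvLetter z] = [pvLetter y ++ pvLetter z ++ " "] from rfl]
            rw [pv_join_cons]
            simp [String.join, String.append_assoc]
          · rw [hLL] at hlen2; simp at hlen2

-- length lemmas for the tightness theorem (inside D_, A's output is one letter longer)
theorem pv_letter_len (i : Nat) : (pvLetter i).length = 1 := by simp [pvLetter]

theorem pv_space_len : (" " : String).length = 1 := by decide

theorem pv_empty_len : ("" : String).length = 0 := by decide

theorem pv_loopA_exit (s : List Int) (h : s.countP (fun v => decide (v > 0)) = 0) :
    ∀ (f : Nat) (out : String), pvLoopA f s out = out := by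
  intro f out
  cases f with
  | zero => rfl
  | succ f =>
    simp only [pvLoopA]
    rw [pv_countA_eq s, h]
    simp

theorem pv_chunk_join_len : ∀ (K : List Nat),
    (String.join (pvChunkPairsB (K.map pvLetter))).length
      = 3 * (K.length / 2) + (if 2 ∣ K.length then 0 else 2)
  | [] => by simp [pvChunkPairsB, String.join]
  | [a] => by
    simp only [List.map_cons, List.map_nil]
    rw [show pvChunkPairsB [pvLetter a] = [pvLetter a ++ " "] from rfl]
    rw [show String.join [pvLetter a ++ " "] = pvLetter a ++ " " from by simp [String.join]]
    simp [String.length_append, pv_letter_len, pv_space_len]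
  | a :: b :: t => by
    have ih := pv_chunk_join_len t
    simp only [List.map_cons]
    rw [show pvChunkPairsB (pvLetter a :: pvLetter b :: t.map pvLetter)
        = (pvLetter a ++ pvLetter b ++ " ") :: pvChunkPairsB (t.map pvLetter) from rfl]
    rw [pv_join_cons]
    simp only [String.length_append, pv_letter_len, pv_space_len, ih, List.length_cons]
    by_cases hd : 2 ∣ t.length
    · rw [if_pos hd, if_pos (by omega : 2 ∣ t.length + 1 + 1)]
      omega
    · rw [if_neg hd, if_neg (by omega : ¬ 2 ∣ t.length + 1 + 1)]
      omega
termination_by K => K.length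

theorem pv_loopA_odd_len : ∀ (f : Nat) (s : List Int), pvPossum s < f →
    s.countP (fun v => decide (v > 0)) ≤ 2 → ¬ 2 ∣ pvPossum s →
    (pvLoopA f s "").length = 3 * ((pvPossum s + 1) / 2) := by
  intro f
  induction f with
  | zero => intro s h _ _; omega
  | succ f ih =>
    intro s hf h2 hodd
    have hS1 : 1 ≤ pvPossum s := by omega
    have hpos : 0 < s.countP (fun v => decide (v > 0)) := pv_npos_pos s (by omega)
    have hne := pv_countP_pos_ne_nil s hpos
    have hi1lt := pv_argmax_lt s hne
    have hi1pos := pv_argmax_pos s hpos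
    have hps1 : pvPossum (pvDec s (pvArgmaxB s)) + 1 = pvPossum s :=
      pv_possum_dec_eq s _ hi1lt hi1pos
    simp only [pvLoopA]
    rw [pv_countA_eq s, if_neg (by omega), if_pos (by omega)]
    rw [pv_findMax_eq s hne]
    by_cases hone : pvPossum s = 1
    · have hc1 : (pvDec s (pvArgmaxB s)).countP (fun v => decide (v > 0)) = 0 := by
        have := pv_npos_le_possum (pvDec s (pvArgmaxB s))
        omega
      have hc2 : (pvDec (pvDec s (pvArgmaxB s)) (pvFindMaxIndexA (pvDec s (pvArgmaxB s)))).countP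
          (fun v => decide (v > 0)) = 0 := by
        have := pv_countP_dec_le (pvDec s (pvArgmaxB s)) (pvFindMaxIndexA (pvDec s (pvArgmaxB s)))
        omega
      rw [pv_loopA_exit _ hc2]
      simp only [String.length_append, pv_letter_len, pv_space_len, pv_empty_len, hone]
    · have hS3 : 3 ≤ pvPossum s := by omega
      have hnpos1 : 0 < (pvDec s (pvArgmaxB s)).countP (fun v => decide (v > 0)) :=
        pv_npos_pos _ (by omega)
      have hs1ne : pvDec s (pvArgmaxB s) ≠ [] := pv_countP_pos_ne_nil _ hnpos1
      have hi2lt := pv_argmax_lt _ hs1ne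
      have hi2pos := pv_argmax_pos _ hnpos1
      have hps2 : pvPossum (pvDec (pvDec s (pvArgmaxB s)) (pvArgmaxB (pvDec s (pvArgmaxB s)))) + 1
          = pvPossum (pvDec s (pvArgmaxB s)) := pv_possum_dec_eq _ _ hi2lt hi2pos
      have hn1 := pv_countP_dec_le s (pvArgmaxB s)
      have hn2 := pv_countP_dec_le (pvDec s (pvArgmaxB s)) (pvArgmaxB (pvDec s (pvArgmaxB s)))
      rw [pv_findMax_eq _ hs1ne]
      rw [pv_loopA_acc]
      have hrec := ih (pvDec (pvDec s (pvArgmaxB s)) (pvArgmaxB (pvDec s (pvArgmaxB s))))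
        (by omega) (by omega) (by omega)
      simp only [String.length_append, pv_letter_len, pv_space_len, pv_empty_len, hrec]
      omega

-- ===== VERDICT (by name: the statement is the Claim_ definition above) =====
theorem GetEvacuationList_spec : Claim_unchanged_GetEvacuationList := by
  intro s _ hND
  simp only [GetEvacuationList, GetEvacuationList_alt, pv_topnpos_eq]
  rw [pv_order_eq_bkt]
  by_cases h3 : s.countP (fun v => decide (v > 0)) > 2
  · rw [if_pos h3]
    rw [pv_single_phase (pvPossum s + 1) s (by omega) (by omega)]
    congr 1
    have hlen : 2 ≤ ((pvBkt s).map pvLetter).length := by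
      simp only [List.length_map, pv_bkt_length]
      have := pv_npos_le_possum s
      omega
    exact pv_gs_eq_take _ hlen
  · rw [if_neg h3]
    have heven : 2 ∣ pvPossum s := by
      by_contra hodd
      exact hND ⟨by omega, hodd⟩
    exact pv_pair_phase (pvPossum s + 1) s (by omega) (by omega) heven

theorem GetEvacuationList_changed : Claim_changed_GetEvacuationList := by
  unfold Claim_changed_GetEvacuationList; decide

theorem GetEvacuationList_tight : Claim_exact_GetEvacuationList := by
  intro s _ hD heq
  obtain ⟨h2, hodd⟩ := hD
  have hodd' : ¬ 2 ∣ pvPossum s := hodd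
  have hlenA : (GetEvacuationList s).length = 3 * ((pvPossum s + 1) / 2) := by
    unfold GetEvacuationList
    exact pv_loopA_odd_len (pvPossum s + 1) s (by omega) h2 hodd'
  have hlenB : (GetEvacuationList_alt s).length = 3 * (pvPossum s / 2) + 2 := by
    simp only [GetEvacuationList_alt, pv_topnpos_eq]
    rw [if_neg (by omega), pv_order_eq_bkt, pv_chunk_join_len (pvBkt s), pv_bkt_length,
      if_neg hodd']
  have := congrArg String.length heq
  rw [hlenA, hlenB] at this
  omega
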